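-- pv_equiv track=rewrite | github.com/likeafox/dynamic-firewall | utils.py | text_column_widths
-- ===== SOURCE A (Python) =====
-- def text_column_widths(rows):
--     col_widths = []
--     for row in rows:
--         row_sz, sz = len(row), len(col_widths)
--         if row_sz > sz:
--             col_widths += [0] * (row_sz - sz)
--         for i,(c,width) in enumerate(zip(row, col_widths)):
--             col_widths[i] = max(width, len(c))
--     return col_widths
-- ===== SOURCE B (Python) =====
-- from itertools import zip_longest
--
-- def text_column_widths(rows):
--     return [max((len(c) for c in col), default=0)
--             for col in zip_longest(*rows, fillvalue="")]
-- ===== Notes on version B (the rewrite author's own statement) =====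
-- stated objective: idiomatic
-- what changed: Replaces A's row-major loop that grows and updates a widths array in place with a column-major reduction: zip_longest transposes the rows and each column is reduced to its max cell length.
import Mathlib
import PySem

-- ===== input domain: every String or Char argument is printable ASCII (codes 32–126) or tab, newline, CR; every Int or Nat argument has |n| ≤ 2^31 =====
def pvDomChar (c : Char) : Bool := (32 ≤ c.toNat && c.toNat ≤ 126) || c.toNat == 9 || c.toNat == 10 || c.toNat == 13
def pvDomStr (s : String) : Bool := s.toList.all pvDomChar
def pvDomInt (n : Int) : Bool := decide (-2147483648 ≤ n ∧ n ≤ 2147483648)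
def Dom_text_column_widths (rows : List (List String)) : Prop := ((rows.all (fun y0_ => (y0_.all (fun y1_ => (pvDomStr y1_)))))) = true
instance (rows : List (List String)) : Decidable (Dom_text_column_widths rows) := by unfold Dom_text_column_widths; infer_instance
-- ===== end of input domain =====

-- B replaces A's row-major in-place growth of the widths array by an idiomatic
-- column-major reduction (zip_longest transpose, then max per column); equal cost.

-- ===== PORT A =====
-- one iteration of A's outer loop: pad col_widths with zeros, then the inner
-- enumerate/zip loop writes max(width, len c) at each index i < len row
def tcwStep (acc : List Int) (row : List String) : List Int :=
  let acc' := if row.length > acc.length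
              then acc ++ List.replicate (row.length - acc.length) 0
              else acc
  (List.zipWith (fun c w => max w (c.length : Int)) row acc') ++ acc'.drop row.length

def text_column_widths (rows : List (List String)) : List Int :=
  rows.foldl tcwStep []

-- ===== PORT B =====
-- port of itertools.zip_longest(*rows, fillvalue=""): column j for each j below
-- the maximal row length, each column listing rows' j-th cells ("" when missing)
def tcwZipLongest (rows : List (List String)) : List (List String) :=
  (List.range (rows.foldl (fun n r => max n r.length) 0)).map
    (fun j => rows.map (fun row => row.getD j ""))

def text_column_widths_alt (rows : List (List String)) : List Int :=
  (tcwZipLongest rows).map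
    (fun col => col.foldl (fun m c => max m (c.length : Int)) 0)

-- ===== PRECONDITION & SPEC =====
def Spec_text_column_widths (rows : List (List String)) (out : List Int) : Prop := out = text_column_widths_alt rows
instance (rows : List (List String)) (out : List Int) : Decidable (Spec_text_column_widths rows out) := by unfold Spec_text_column_widths; infer_instance

-- ===== CLAIM (what is proved, stated in full; the proofs are below) =====
def Claim_equal_text_column_widths : Prop := ∀ (rows : List (List String)), Dom_text_column_widths rows → Spec_text_column_widths rows (text_column_widths rows)

-- ===== LEMMAS AND PROOFS =====

-- length of one cell at column j, 0 when the row is too short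
def tcwLenAt (row : List String) (j : Nat) : Int := ((row.getD j "").length : Int)

-- recursive characterization of one iteration of A's outer loop
def tcwMerge : List Int → List String → List Int
  | acc, [] => acc
  | [], c :: row => max 0 (c.length : Int) :: tcwMerge [] row
  | w :: acc, c :: row => max w (c.length : Int) :: tcwMerge acc row

theorem tcwStep_nil_row (acc : List Int) : tcwStep acc [] = acc := by
  simp [tcwStep]

theorem tcwStep_nil_acc (c : String) (row : List String) :
    tcwStep [] (c :: row) = max 0 (c.length : Int) :: tcwStep [] row := by
  simp only [tcwStep, List.length_cons, List.length_nil, gt_iff_lt, Nat.zero_lt_succ,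
    if_true, List.nil_append, Nat.sub_zero, List.replicate_succ, List.zipWith_cons_cons,
    List.drop_succ_cons]
  cases row <;> simp

theorem tcwStep_cons_cons (w : Int) (acc : List Int) (c : String) (row : List String) :
    tcwStep (w :: acc) (c :: row) = max w (c.length : Int) :: tcwStep acc row := by
  simp only [tcwStep, List.length_cons, gt_iff_lt, Nat.add_lt_add_iff_right,
    Nat.succ_sub_succ]
  split_ifs with hif <;> simp [List.zipWith, List.drop_succ_cons]

theorem tcwStep_eq_tcwMerge (acc : List Int) (row : List String) :
    tcwStep acc row = tcwMerge acc row := by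
  induction row generalizing acc with
  | nil => cases acc <;> simp [tcwStep_nil_row, tcwMerge]
  | cons c row ih =>
      cases acc with
      | nil => rw [tcwStep_nil_acc, ih]; rfl
      | cons w acc => rw [tcwStep_cons_cons, ih]; rfl

theorem tcwMerge_length (acc : List Int) (row : List String) :
    (tcwMerge acc row).length = max acc.length row.length := by
  induction row generalizing acc with
  | nil => cases acc <;> simp [tcwMerge]
  | cons c row ih =>
      cases acc with
      | nil => simp [tcwMerge, ih]
      | cons w acc => simp [tcwMerge, ih]

theorem tcwMerge_getD (acc : List Int) (row : List String) (j : Nat)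
    (h : ∀ k, 0 ≤ acc.getD k 0) :
    (tcwMerge acc row).getD j 0 = max (acc.getD j 0) (tcwLenAt row j) := by
  induction row generalizing acc j with
  | nil =>
      show acc.getD j 0 = max (acc.getD j 0) (tcwLenAt [] j)
      rw [show tcwLenAt [] j = 0 by simp [tcwLenAt], max_eq_left (h j)]
  | cons c row ih =>
      cases acc with
      | nil =>
          cases j with
          | zero => simp [tcwMerge, tcwLenAt]
          | succ j => simpa [tcwMerge, tcwLenAt] using ih [] j (by simp)
      | cons w acc =>
          cases j with
          | zero => simp [tcwMerge, tcwLenAt]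
          | succ j => simpa [tcwMerge, tcwLenAt] using ih acc j (fun k => h (k + 1))

theorem tcwMerge_nonneg (acc : List Int) (row : List String)
    (h : ∀ k, 0 ≤ acc.getD k 0) : ∀ k, 0 ≤ (tcwMerge acc row).getD k 0 := by
  intro k
  rw [tcwMerge_getD _ _ _ h]
  exact le_trans (h k) (le_max_left _ _)

theorem tcw_fold_length (rows : List (List String)) (acc : List Int) :
    (rows.foldl tcwStep acc).length = rows.foldl (fun n r => max n r.length) acc.length := by
  induction rows generalizing acc with
  | nil => rfl
  | cons r rs ih => simp [List.foldl_cons, ih, tcwStep_eq_tcwMerge, tcwMerge_length]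

theorem tcw_fold_getD (rows : List (List String)) (acc : List Int) (j : Nat)
    (h : ∀ k, 0 ≤ acc.getD k 0) :
    (rows.foldl tcwStep acc).getD j 0
      = rows.foldl (fun m r => max m (tcwLenAt r j)) (acc.getD j 0) := by
  induction rows generalizing acc with
  | nil => rfl
  | cons r rs ih =>
      simp only [List.foldl_cons]
      rw [ih _ (fun k => by rw [tcwStep_eq_tcwMerge]; exact tcwMerge_nonneg _ _ h k),
        tcwStep_eq_tcwMerge, tcwMerge_getD _ _ _ h]

-- ===== VERDICT (by name: the statement is the Claim_ definition above) =====
theorem text_column_widths_spec : Claim_equal_text_column_widths := by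
  intro rows _
  unfold Spec_text_column_widths text_column_widths text_column_widths_alt tcwZipLongest
  apply List.ext_getElem
  · simp [tcw_fold_length]
  · intro j hj hj'
    have hA : (rows.foldl tcwStep [])[j] = (rows.foldl tcwStep []).getD j 0 :=
      (List.getD_eq_getElem _ _ hj).symm
    rw [hA, tcw_fold_getD rows [] j (by simp)]
    simp [List.foldl_map, tcwLenAt]
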